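-- pv_equiv track=rewrite | github.com/maximilianq/adventOfCode2021 | day14/day14.py | count
-- ===== SOURCE A (Python) =====
-- def count(_data):
--     keys = _data.keys()
--
--     symbols = []
--     for key in keys:
--         symbols.append(key[0])
--
--     occurences = {}
--
--     for key in keys:
--         if key[0] in occurences:
--             occurences[key[0]] += _data[key]
--         else:
--             occurences[key[0]] = _data[key]
--
--     return occurences
-- ===== SOURCE B (Python) =====
-- def count(_data):
--     # two-phase collect-then-reduce: bucket every value under its key's first
--     # character, then sum each bucket (first-occurrence order is preserved)
--     groups = {}
--     for key, value in _data.items():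
--         groups.setdefault(key[0], []).append(value)
--     return {symbol: sum(values) for symbol, values in groups.items()}
-- ===== Notes on version B (the rewrite author's own statement) =====
-- stated objective: alternative
-- what changed: Replaces A's incremental if-in-dict-else accumulation (plus its dead symbols list) with a two-phase collect-then-reduce: bucket every value under its key's first character via setdefault, then sum each bucket in a dict comprehension.
import Mathlib
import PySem

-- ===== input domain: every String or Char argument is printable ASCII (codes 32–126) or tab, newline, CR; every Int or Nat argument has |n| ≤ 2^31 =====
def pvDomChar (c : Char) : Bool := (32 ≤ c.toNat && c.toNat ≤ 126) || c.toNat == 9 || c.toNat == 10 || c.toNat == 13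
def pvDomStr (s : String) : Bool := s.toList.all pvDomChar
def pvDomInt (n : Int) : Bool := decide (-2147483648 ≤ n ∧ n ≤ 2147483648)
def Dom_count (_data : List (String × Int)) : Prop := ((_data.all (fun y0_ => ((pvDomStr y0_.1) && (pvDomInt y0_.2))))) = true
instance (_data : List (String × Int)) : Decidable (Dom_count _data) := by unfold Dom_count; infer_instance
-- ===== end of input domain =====

-- B replaces A's incremental if-in-dict-else accumulation with a per-group summation
-- dict comprehension: a genuinely different (alternative, not faster) decomposition.


-- key[0] as a Python one-character string; "" only reachable for an empty key, which Pre_count excludes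
def pvFirst (s : String) : String :=
  match PySem.Str.pyGet? s 0 with
  | some c => String.ofList [c]
  | none => ""

-- ===== PORT A =====
def count (_data : List (String × Int)) : List (String × Int) :=
  let d := PySem.Dict.ofList _data
  let keys := d.keys
  let _symbols := keys.foldl (fun acc key => acc ++ [pvFirst key]) []
  let occurences :=
    keys.foldl (fun occ key =>
      if occ.contains (pvFirst key) then
        occ.insert (pvFirst key) (occ.getD (pvFirst key) 0 + d.getD key 0)
      else
        occ.insert (pvFirst key) (d.getD key 0)) (PySem.Dict.empty)
  occurences.items

-- ===== PORT B =====
def count_alt (_data : List (String × Int)) : List (String × Int) :=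
  let d := PySem.Dict.ofList _data
  -- phase 1: groups.setdefault(key[0], []).append(value)
  let groups := d.items.foldl
    (fun g p => g.modify (pvFirst p.1) [] (fun vs => vs ++ [p.2]))
    (PySem.Dict.empty : PySem.Dict String (List Int))
  -- phase 2: {symbol: sum(values) for symbol, values in groups.items()}
  (groups.items.foldl
    (fun occ q => occ.insert q.1 (q.2.foldl (· + ·) 0))
    (PySem.Dict.empty : PySem.Dict String Int)).items

-- ===== PRECONDITION & SPEC =====
-- Pre_: every key is nonempty — on an empty key both Pythons raise IndexError at key[0]
def Pre_count (_data : List (String × Int)) : Prop := ∀ p ∈ _data, p.1 ≠ ""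
instance (_data : List (String × Int)) : Decidable (Pre_count _data) := by unfold Pre_count; infer_instance
def pvWitness_count : (List (String × Int)) := [("AB", 2), ("AC", 3), ("BD", 5)]
def Spec_count (_data : List (String × Int)) (out : List (String × Int)) : Prop := out = count_alt _data
instance (_data : List (String × Int)) (out : List (String × Int)) : Decidable (Spec_count _data out) := by unfold Spec_count; infer_instance

-- ===== CLAIM (what is proved, stated in full; the proofs are below) =====
def Claim_equal_count : Prop := ∀ (_data : List (String × Int)), Dom_count _data → Pre_count _data → Spec_count _data (count _data)

-- ===== LEMMAS AND PROOFS =====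

-- A's branching step is one uniform insert (the else-branch's value equals getD + value since getD is 0 there)
theorem pv_stepA_uniform (keys : List String) (g : String → Int) :
    keys.foldl (fun occ key =>
      if occ.contains (pvFirst key) then
        occ.insert (pvFirst key) (occ.getD (pvFirst key) 0 + g key)
      else
        occ.insert (pvFirst key) (g key)) (PySem.Dict.empty : PySem.Dict String Int)
    = keys.foldl (fun occ key =>
        occ.insert (pvFirst key)
          (if occ.contains (pvFirst key) then occ.getD (pvFirst key) 0 + g key else g key))
        (PySem.Dict.empty) := by
  apply List.foldl_ext
  intro occ key _
  split_ifs <;> rfl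

-- A's accumulation loop: final value at c = initial value + sum of g over keys whose first char is c
theorem pv_getD_foldA (l : List String) (g : String → Int) (dct : PySem.Dict String Int) (c : String) :
    (l.foldl (fun occ key =>
      if occ.contains (pvFirst key) then
        occ.insert (pvFirst key) (occ.getD (pvFirst key) 0 + g key)
      else
        occ.insert (pvFirst key) (g key)) dct).getD c 0
    = dct.getD c 0 + ((l.filter (fun k => pvFirst k == c)).map g).sum := by
  induction l generalizing dct with
  | nil => simp
  | cons h t ih =>
    simp only [List.foldl_cons, List.filter_cons]
    by_cases hc : pvFirst h = c
    · subst hc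
      simp only [beq_self_eq_true, if_pos, List.map_cons, List.sum_cons]
      split_ifs with hcon
      · rw [ih, PySem.Dict.getD_insert]
        simp; ring
      · rw [ih, PySem.Dict.getD_insert]
        have h0 : dct.getD (pvFirst h) 0 = 0 :=
          PySem.Dict.getD_of_not_contains dct 0 (by simpa using hcon)
        simp [h0]
    · have hcb : (pvFirst h == c) = false := by simpa using hc
      simp only [hcb, Bool.false_eq_true, if_false]
      have hne : c ≠ pvFirst h := fun e => hc e.symm
      split_ifs with hcon <;> rw [ih, PySem.Dict.getD_insert, if_neg hne]

-- B's bucketing loop: the bucket at c collects, in order, the values whose key's first char is c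
theorem pv_getD_groups (l : List (String × Int)) (g0 : PySem.Dict String (List Int)) (c : String) :
    (l.foldl (fun g p => g.modify (pvFirst p.1) [] (fun vs => vs ++ [p.2])) g0).getD c []
    = g0.getD c [] ++ (l.filter (fun p => pvFirst p.1 == c)).map (fun p => p.2) := by
  induction l generalizing g0 with
  | nil => simp
  | cons h t ih =>
    simp only [List.foldl_cons, List.filter_cons]
    by_cases hc : pvFirst h.1 = c
    · subst hc
      simp only [beq_self_eq_true, if_pos, List.map_cons]
      rw [ih, PySem.Dict.getD_modify]
      simp
    · have hcb : (pvFirst h.1 == c) = false := by simpa using hc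
      simp only [hcb, Bool.false_eq_true, if_false]
      rw [ih, PySem.Dict.getD_modify, if_neg (fun e => hc e.symm)]

-- A-side per-character sum over keys equals the sum over the matching items
theorem pv_sums_eq (d : PySem.Dict String Int) (hnd : d.keys.Nodup) (c : String) :
    ((d.keys.filter (fun k => pvFirst k == c)).map (fun k => d.getD k 0)).sum
    = ((d.items.filter (fun p => pvFirst p.1 == c)).map (fun p => p.2)).sum := by
  have hkeys : d.keys = d.items.map (fun p => p.1) := rfl
  rw [hkeys, List.filter_map, List.map_map]
  congr 1
  apply List.map_congr_left
  intro p hp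
  have hp' : p ∈ d.items := List.mem_of_mem_filter hp
  exact PySem.Dict.getD_of_mem_items d (k := p.1) (v := p.2) hp' hnd 0

-- the two result dicts have identical items lists
theorem pv_main (d : PySem.Dict String Int) (hnd : d.keys.Nodup) :
    (d.keys.foldl (fun occ key =>
      if occ.contains (pvFirst key) then
        occ.insert (pvFirst key) (occ.getD (pvFirst key) 0 + d.getD key 0)
      else
        occ.insert (pvFirst key) (d.getD key 0)) (PySem.Dict.empty)).items
    = ((d.items.foldl
        (fun g p => g.modify (pvFirst p.1) [] (fun vs => vs ++ [p.2]))
        (PySem.Dict.empty : PySem.Dict String (List Int))).items.foldl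
          (fun occ q => occ.insert q.1 (q.2.foldl (· + ·) 0))
          (PySem.Dict.empty : PySem.Dict String Int)).items := by
  have hfold : ∀ l : List Int, l.foldl (· + ·) 0 = l.sum := by
    intro l
    have := PySem.List.foldl_add l (fun x => x) 0
    simpa using this
  set A := (d.keys.foldl (fun occ key =>
      if occ.contains (pvFirst key) then
        occ.insert (pvFirst key) (occ.getD (pvFirst key) 0 + d.getD key 0)
      else
        occ.insert (pvFirst key) (d.getD key 0)) (PySem.Dict.empty)) with hAdef
  set groups := d.items.foldl
      (fun g p => g.modify (pvFirst p.1) [] (fun vs => vs ++ [p.2]))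
      (PySem.Dict.empty : PySem.Dict String (List Int)) with hGdef
  -- keys of groups and of A are the same ordered list
  have hgk : groups.keys = PySem.Set.update [] (d.items.map (fun p => pvFirst p.1)) := by
    rw [hGdef, PySem.Dict.keys_foldl_modify_key]; simp [PySem.Dict.keys_empty]
  have hAk : A.keys = PySem.Set.update [] (d.items.map (fun p => pvFirst p.1)) := by
    rw [hAdef, pv_stepA_uniform, PySem.Dict.keys_foldl_insert_key]
    have : d.items.map (fun p => pvFirst p.1) = d.keys.map pvFirst := by
      simp [PySem.Dict.keys, List.map_map, Function.comp]
    rw [this]; simp [PySem.Dict.keys_empty]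
  have hgnd : groups.keys.Nodup := by
    rw [hGdef]
    exact PySem.Dict.nodup_keys_foldl_modify_key _ _ _ _ _ (by simp)
  have hndA : A.keys.Nodup := by
    rw [hAdef, pv_stepA_uniform]
    exact PySem.Dict.nodup_keys_foldl_insert_key _ _ _ _ (by simp)
  -- phase 2 inserts the (distinct, fresh) group keys in order
  have hfresh : ∀ q ∈ groups.items,
      (PySem.Dict.empty : PySem.Dict String Int).contains q.1 = false := by
    intro q _; exact PySem.Dict.contains_empty q.1
  have hgnd' : (groups.items.map (fun q => q.1)).Nodup := hgnd
  rw [PySem.Dict.items_foldl_insert_fresh groups.items (fun q => q.1)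
        (fun q => q.2.foldl (· + ·) 0) _ hfresh hgnd']
  rw [PySem.Dict.items_eq_map_keys groups hgnd []]
  rw [PySem.Dict.items_eq_map_keys A hndA 0]
  simp only [List.map_map, List.nil_append, PySem.Dict.empty]
  rw [hAk, ← hgk]
  apply List.map_congr_left
  intro c _
  simp only [Function.comp]
  congr 1
  have hvA : A.getD c 0
      = ((d.keys.filter (fun k => pvFirst k == c)).map (fun k => d.getD k 0)).sum := by
    rw [hAdef, pv_getD_foldA]; simp
  have hvG : groups.getD c []
      = (d.items.filter (fun p => pvFirst p.1 == c)).map (fun p => p.2) := by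
    rw [hGdef, pv_getD_groups]; simp
  rw [hvA, hvG, hfold, pv_sums_eq d hnd]

-- ===== VERDICT (by name: the statement is the Claim_ definition above) =====
theorem count_spec : Claim_equal_count := by
  intro _data _hd _hp
  unfold Spec_count count count_alt
  exact pv_main (PySem.Dict.ofList _data) (PySem.Dict.nodup_keys_ofList _data)
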